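-- pv_equiv track=rewrite | github.com/VassilisDrouzas/IMDB_NaiveBayes | dataProcess.py | construct_0_1_array
-- ===== SOURCE A (Python) =====
-- def construct_0_1_array(data,list):                     #Construct the 0-1 array.
--
--     i=0
--     final=[[]]
--
--     for text in data:
--         words=text[0].split()
--
--
--         for word in list:
--             if (words.__contains__(word)):
--                 final[i].append(1)
--             else:
--                 final[i].append(0)
--         i+=1
--         final.append([])
--     final.pop()                #Omit the final character
--     return final
-- ===== SOURCE B (Python) =====
-- def construct_0_1_array(data, list):
--     # Column-major construction: compute one 0/1 column per vocabulary word
--     # against precomputed word sets, then transpose to rows.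
--     word_sets = [set(text[0].split()) for text in data]
--     cols = [[1 if ws.__contains__(w) else 0 for ws in word_sets] for w in list]
--     return [[col[i] for col in cols] for i in range(len(data))]
-- ===== Notes on version B (the rewrite author's own statement) =====
-- stated objective: alternative
-- what changed: B precomputes a word set per text and builds the matrix column-by-column (one 0/1 column per vocabulary word), then transposes, instead of A's row-by-row list-membership scans with index bookkeeping and a trailing pop.
import Mathlib
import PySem

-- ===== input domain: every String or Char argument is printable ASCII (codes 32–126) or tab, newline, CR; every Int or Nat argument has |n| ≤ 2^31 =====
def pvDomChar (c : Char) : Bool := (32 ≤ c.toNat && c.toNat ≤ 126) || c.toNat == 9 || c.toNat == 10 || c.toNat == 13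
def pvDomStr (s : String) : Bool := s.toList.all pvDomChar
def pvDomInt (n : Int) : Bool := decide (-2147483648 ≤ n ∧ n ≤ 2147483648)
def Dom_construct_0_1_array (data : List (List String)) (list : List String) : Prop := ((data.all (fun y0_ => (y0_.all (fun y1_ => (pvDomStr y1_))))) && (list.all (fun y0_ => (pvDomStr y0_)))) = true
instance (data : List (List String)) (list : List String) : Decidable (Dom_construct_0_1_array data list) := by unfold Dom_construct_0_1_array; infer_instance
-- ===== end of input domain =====

-- B builds the matrix column-by-column from per-text word sets and transposes; A builds rows in place.

-- ===== PORT A =====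
def construct_0_1_array (data : List (List String)) (list : List String) : List (List Int) :=
  let st := data.foldl (fun (st : Nat × List (List Int)) text =>
    let words := PySem.Str.split₀ ((PySem.List.pyGet? text 0).getD "")
    let final := list.foldl (fun f word =>
        PySem.List.pySetD f (st.1 : Int)
          (PySem.List.pyGetD f (st.1 : Int) [] ++ [if words.contains word then (1 : Int) else 0])) st.2
    (st.1 + 1, final ++ [[]])) (0, [[]])
  st.2.dropLast            -- final.pop()

-- ===== PORT B =====
def construct_0_1_array_alt (data : List (List String)) (list : List String) : List (List Int) :=
  let word_sets := data.map (fun text =>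
    PySem.Set.ofList (PySem.Str.split₀ ((PySem.List.pyGet? text 0).getD "")))
  let cols := list.map (fun w =>
    word_sets.map (fun ws => if PySem.Set.contains ws w then (1 : Int) else 0))
  (PySem.List.pyRange 0 data.length 1).map (fun i =>
    cols.map (fun col => PySem.List.pyGetD col i 0))

-- ===== PRECONDITION & SPEC =====
-- Pre_ excludes inputs where some text is the empty list: there text[0] raises IndexError in A (and in B).
def Pre_construct_0_1_array (data : List (List String)) (list : List String) : Prop :=
  ∀ text ∈ data, text ≠ []
instance (data : List (List String)) (list : List String) : Decidable (Pre_construct_0_1_array data list) := by unfold Pre_construct_0_1_array; infer_instance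
def pvWitness_construct_0_1_array : List (List String) × List String := ([["a bb c"], ["bb"]], ["a", "bb", "zz"])

def Spec_construct_0_1_array (data : List (List String)) (list : List String) (out : List (List Int)) : Prop := out = construct_0_1_array_alt data list
instance (data : List (List String)) (list : List String) (out : List (List Int)) : Decidable (Spec_construct_0_1_array data list out) := by unfold Spec_construct_0_1_array; infer_instance

-- ===== CLAIM (what is proved, stated in full; the proofs are below) =====
def Claim_equal_construct_0_1_array : Prop := ∀ (data : List (List String)) (list : List String), Dom_construct_0_1_array data list → Pre_construct_0_1_array data list → Spec_construct_0_1_array data list (construct_0_1_array data list)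

-- ===== LEMMAS AND PROOFS =====

-- the common reference value: one row per text, the 0/1 membership indicators over `list`
def pvRowOf (list : List String) (text : List String) : List Int :=
  list.map (fun w =>
    if (PySem.Str.split₀ ((PySem.List.pyGet? text 0).getD "")).contains w then (1 : Int) else 0)

-- A's inner loop appends bits one by one to the slot at index acc.length
lemma a_inner (l : List String) (bit : String → Int) :
    ∀ (acc : List (List Int)) (cur : List Int),
    l.foldl (fun f word =>
        PySem.List.pySetD f (acc.length : Int)
          (PySem.List.pyGetD f (acc.length : Int) [] ++ [bit word])) (acc ++ [cur])
      = acc ++ [cur ++ l.map bit] := by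
  induction l with
  | nil => intro acc cur; simp
  | cons x xs ih =>
      intro acc cur
      have ih' := ih acc (cur ++ [bit x])
      simp only [List.foldl_cons, PySem.List.pySetD_natCast, PySem.List.pyGetD_natCast] at ih' ⊢
      have hget : (acc ++ [cur]).getD acc.length [] = cur := by
        simp [List.getD]
      have hset : (acc ++ [cur]).set acc.length (cur ++ [bit x]) = acc ++ [cur ++ [bit x]] := by
        rw [List.set_append_right _ _ (le_refl _)]
        simp
      rw [hget, hset, ih']
      simp [List.map_cons]

-- A's outer loop accumulates the finished rows in front of a fresh empty slot
lemma a_outer (list : List String) :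
    ∀ (data : List (List String)) (acc : List (List Int)),
    (data.foldl (fun (st : Nat × List (List Int)) text =>
      let words := PySem.Str.split₀ ((PySem.List.pyGet? text 0).getD "")
      let final := list.foldl (fun f word =>
          PySem.List.pySetD f (st.1 : Int)
            (PySem.List.pyGetD f (st.1 : Int) [] ++ [if words.contains word then (1 : Int) else 0])) st.2
      (st.1 + 1, final ++ [[]])) (acc.length, acc ++ [[]])).2
      = acc ++ data.map (pvRowOf list) ++ [[]] := by
  intro data
  induction data with
  | nil => intro acc; simp
  | cons t ts ih =>
      intro acc
      simp only [List.foldl_cons]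
      have h := a_inner (bit := fun w =>
          if (PySem.Str.split₀ ((PySem.List.pyGet? t 0).getD "")).contains w then (1 : Int) else 0)
          list acc []
      simp only [List.nil_append] at h
      rw [h]
      have hlen : (acc ++ [list.map (fun w =>
          if (PySem.Str.split₀ ((PySem.List.pyGet? t 0).getD "")).contains w then (1 : Int) else 0)]).length
          = acc.length + 1 := by simp
      have := ih (acc ++ [list.map (fun w =>
          if (PySem.Str.split₀ ((PySem.List.pyGet? t 0).getD "")).contains w then (1 : Int) else 0)])
      rw [hlen] at this
      rw [List.append_assoc] at this ⊢
      rw [this]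
      simp [pvRowOf]

lemma a_eq_rows (data : List (List String)) (list : List String) :
    construct_0_1_array data list = data.map (pvRowOf list) := by
  unfold construct_0_1_array
  have h := a_outer list data []
  simp only [List.length_nil, List.nil_append] at h
  simp only [h]
  simp

lemma b_eq_rows (data : List (List String)) (list : List String) :
    construct_0_1_array_alt data list = data.map (pvRowOf list) := by
  unfold construct_0_1_array_alt
  rw [PySem.List.pyRange_one]
  simp only [Int.sub_zero, Int.toNat_natCast, List.map_map]
  apply List.ext_getElem
  · simp
  · intro i h1 h2
    simp only [List.length_map, List.length_range] at h1 h2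
    simp only [List.getElem_map, List.getElem_range, Function.comp_apply, zero_add]
    unfold pvRowOf
    apply List.map_congr_left
    intro w hw
    simp only [Function.comp_apply, PySem.List.pyGetD_natCast]
    rw [List.getD_eq_getElem?_getD, List.getElem?_map]
    rw [List.getElem?_eq_getElem h2]
    simp only [Option.map_some, Option.getD_some]
    by_cases hmem : w ∈ PySem.Str.split₀ ((PySem.List.pyGet? data[i] 0).getD "")
    · simp [PySem.Set.contains, hmem, List.contains_iff_mem, PySem.Set.mem_ofList]
    · simp [PySem.Set.contains, hmem, List.contains_iff_mem, PySem.Set.mem_ofList]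

-- ===== VERDICT (by name: the statement is the Claim_ definition above) =====
theorem construct_0_1_array_spec : Claim_equal_construct_0_1_array := by
  intro data list _ _
  unfold Spec_construct_0_1_array
  rw [a_eq_rows, b_eq_rows]
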